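-- pv_equiv track=rewrite | github.com/GentaKawabata/AtCoder | abc177/c/main.py | get_cumulative_sum_sequential_mod
-- ===== SOURCE A (Python) =====
-- from typing import List
--
-- MOD = int(1e9 + 7)
--
-- def get_cumulative_sum_sequential_mod(numbers: List[int]):
--     """forで累積和を求める。 MOD 使用
--     This method works.
--     """
--     result: List[int] = [0]
--
--     for number in numbers:
--         sum = result[-1] + number
--         if sum < 0:
--             sum += MOD
--         sum %= MOD
--         result.append(sum)
--     return result
-- ===== SOURCE B (Python) =====
-- from typing import List
--
-- MOD = int(1e9 + 7)
--
-- def get_cumulative_sum_sequential_mod(numbers: List[int]):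
--     """Divide-and-conquer scan: prefix-sum-mods of each half; the right half
--     is shifted by the left half's total (mod MOD is a ring congruence)."""
--     def rec(a: List[int]) -> List[int]:
--         if len(a) <= 1:
--             return [x % MOD for x in a]
--         m = len(a) // 2
--         left = rec(a[:m])
--         right = rec(a[m:])
--         t = left[-1]
--         return left + [(t + r) % MOD for r in right]
--     return [0] + rec(numbers)
-- ===== Notes on version B (the rewrite author's own statement) =====
-- stated objective: alternative
-- what changed: B replaces A's sequential accumulator loop with a divide-and-conquer scan: recursively compute the prefix-sum-mods of each half and shift the right half's values by the left half's total, which is correct because taking mod MOD is a ring congruence.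
import Mathlib
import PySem

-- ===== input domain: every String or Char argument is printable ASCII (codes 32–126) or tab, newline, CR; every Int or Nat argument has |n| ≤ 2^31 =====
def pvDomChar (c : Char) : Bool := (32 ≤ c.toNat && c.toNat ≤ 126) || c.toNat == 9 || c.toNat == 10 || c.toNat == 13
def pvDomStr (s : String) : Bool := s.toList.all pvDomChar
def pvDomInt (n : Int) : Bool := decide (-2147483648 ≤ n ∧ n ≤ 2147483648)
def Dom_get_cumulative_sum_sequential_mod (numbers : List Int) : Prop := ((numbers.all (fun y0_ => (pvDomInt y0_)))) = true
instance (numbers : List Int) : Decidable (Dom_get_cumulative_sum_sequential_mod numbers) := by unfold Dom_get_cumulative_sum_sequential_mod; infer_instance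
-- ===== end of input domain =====

-- B replaces A's sequential accumulator loop with a divide-and-conquer scan (prefix-sum-mods
-- of each half, right half shifted by the left half's total); objective: alternative.

def pvMOD : Int := 1000000007

-- ===== PORT A =====
-- A: one loop, each step reads result[-1], adds, fixes up negatives, reduces mod, appends.
def get_cumulative_sum_sequential_mod (numbers : List Int) : List Int :=
  numbers.foldl (fun result number =>
    -- sum = result[-1] + number  (result starts as [0] so it is never empty; getD 0 is never used)
    let sum := (PySem.List.pyGet? result (-1)).getD 0 + number
    let sum := if sum < 0 then sum + pvMOD else sum
    let sum := PySem.Int.mod sum pvMOD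
    result ++ [sum]) [0]

-- ===== PORT B =====
-- B's inner rec: divide and conquer on the list, splitting at the midpoint.
def pvRec (a : List Int) : List Int :=
  if _h : a.length ≤ 1 then a.map (fun x => PySem.Int.mod x pvMOD)
  else
    let m := a.length / 2
    let left := pvRec (a.take m)
    let right := pvRec (a.drop m)
    let t := (PySem.List.pyGet? left (-1)).getD 0   -- t = left[-1]
    left ++ right.map (fun r => PySem.Int.mod (t + r) pvMOD)
termination_by a.length
decreasing_by
  · simp only [List.length_take]; omega
  · simp only [List.length_drop]; omega

def get_cumulative_sum_sequential_mod_alt (numbers : List Int) : List Int :=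
  [0] ++ pvRec numbers

-- ===== PRECONDITION & SPEC =====
def Spec_get_cumulative_sum_sequential_mod (numbers : List Int) (out : List Int) : Prop := out = get_cumulative_sum_sequential_mod_alt numbers
instance (numbers : List Int) (out : List Int) : Decidable (Spec_get_cumulative_sum_sequential_mod numbers out) := by unfold Spec_get_cumulative_sum_sequential_mod; infer_instance

-- ===== CLAIM (what is proved, stated in full; the proofs are below) =====
def Claim_equal_get_cumulative_sum_sequential_mod : Prop := ∀ (numbers : List Int), Dom_get_cumulative_sum_sequential_mod numbers → Spec_get_cumulative_sum_sequential_mod numbers (get_cumulative_sum_sequential_mod numbers)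

-- ===== LEMMAS AND PROOFS =====

-- Raw (exact-integer) sums of the nonempty prefixes of a list.
def pvRaws : List Int → List Int
  | [] => []
  | x :: xs => x :: (pvRaws xs).map (fun p => x + p)

theorem pvRaws_append (l r : List Int) :
    pvRaws (l ++ r) = pvRaws l ++ (pvRaws r).map (fun p => l.sum + p) := by
  induction l with
  | nil => simp [pvRaws]
  | cons x xs ih =>
    simp [pvRaws, ih, List.map_map, add_assoc]

theorem pvRaws_concat (l : List Int) (h : l ≠ []) :
    ∃ p, pvRaws l = p ++ [l.sum] := by
  induction l with
  | nil => exact absurd rfl h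
  | cons x xs ih =>
    cases xs with
    | nil => exact ⟨[], by simp [pvRaws]⟩
    | cons y ys =>
      obtain ⟨p, hp⟩ := ih (by simp)
      refine ⟨x :: p.map (fun q => x + q), ?_⟩
      have hx : pvRaws (x :: y :: ys) = x :: (pvRaws (y :: ys)).map (fun q => x + q) := rfl
      rw [hx, hp]
      simp

theorem pv_mod_add_mod (t r : Int) :
    PySem.Int.mod (PySem.Int.mod t pvMOD + r) pvMOD = PySem.Int.mod (t + r) pvMOD := by
  have hm : (0:Int) < pvMOD := by norm_num [pvMOD]
  rw [PySem.Int.mod_eq_emod_of_pos hm, PySem.Int.mod_eq_emod_of_pos hm,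
      PySem.Int.mod_eq_emod_of_pos hm]
  rw [Int.add_emod, Int.emod_emod_of_dvd _ dvd_rfl, ← Int.add_emod]

theorem pv_add_mod_mod (t r : Int) :
    PySem.Int.mod (t + PySem.Int.mod r pvMOD) pvMOD = PySem.Int.mod (t + r) pvMOD := by
  rw [add_comm t, pv_mod_add_mod, add_comm]

-- B's rec computes the mod-reductions of the raw nonempty-prefix sums.
theorem pvRec_eq_raws : ∀ (a : List Int),
    pvRec a = (pvRaws a).map (fun x => PySem.Int.mod x pvMOD) := by
  intro a
  induction hn : a.length using Nat.strong_induction_on generalizing a with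
  | _ n ih =>
    rw [pvRec]
    by_cases h : a.length ≤ 1
    · simp only [h, dif_pos]
      match a with
      | [] => rfl
      | [x] => rfl
      | x :: y :: t => simp at h
    · simp only [h, dif_neg, not_false_iff]
      have hm1 : 1 ≤ a.length / 2 := by omega
      have hmlt : a.length / 2 < a.length := by omega
      have htk : (a.take (a.length / 2)).length = a.length / 2 := by
        simp; omega
      have hdp : (a.drop (a.length / 2)).length = a.length - a.length / 2 := by simp
      have hL := ih _ (by omega : (a.take (a.length / 2)).length < n) _ rfl
      have hR := ih _ (by rw [hdp]; omega : (a.drop (a.length / 2)).length < n) _ rfl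
      have htkne : a.take (a.length / 2) ≠ [] := by
        intro hc; rw [hc] at htk; simp at htk; omega
      obtain ⟨p, hp⟩ := pvRaws_concat _ htkne
      have hlast : (PySem.List.pyGet?
          ((pvRaws (a.take (a.length / 2))).map (fun x => PySem.Int.mod x pvMOD)) (-1)).getD 0
          = PySem.Int.mod (a.take (a.length / 2)).sum pvMOD := by
        rw [hp, List.map_append]
        simp [PySem.List.pyGet?_neg_one_append_singleton]
      simp only [hL, hR, hlast]
      have hsplit : pvRaws a
          = pvRaws (a.take (a.length / 2))
            ++ (pvRaws (a.drop (a.length / 2))).map (fun q => (a.take (a.length / 2)).sum + q) := by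
        conv_lhs => rw [← List.take_append_drop (a.length / 2) a]
        exact pvRaws_append _ _
      rw [hsplit, List.map_append, List.map_map, List.map_map]
      congr 1
      apply List.map_congr_left
      intro q _
      simp [Function.comp, pv_mod_add_mod, pv_add_mod_mod]

-- The raw prefix foldl (A's loop with the mod stripped off) builds p ++ (shifted raws).
theorem pv_rawfold (numbers : List Int) : ∀ (p : List Int) (t : Int),
    (numbers.foldl (fun (st : List Int × Int) n =>
        (st.1 ++ [st.2 + n], st.2 + n)) (p, t)).1
    = p ++ (pvRaws numbers).map (fun q => t + q) := by
  induction numbers with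
  | nil => intro p t; simp [pvRaws]
  | cons n ns ih =>
    intro p t
    simp only [List.foldl_cons]
    rw [ih]
    simp [pvRaws, List.map_map, add_assoc]

-- A's fold, started from the mod-reduction of a raw prefix list ending in t, stays the
-- pointwise mod-reduction of the raw prefix fold.
theorem pv_fold_corr (numbers : List Int) : ∀ (p : List Int) (t : Int),
    numbers.foldl (fun result number =>
        let sum := (PySem.List.pyGet? result (-1)).getD 0 + number
        let sum := if sum < 0 then sum + pvMOD else sum
        let sum := PySem.Int.mod sum pvMOD
        result ++ [sum]) ((p ++ [t]).map (fun x => PySem.Int.mod x pvMOD))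
    = ((numbers.foldl (fun (st : List Int × Int) n =>
          (st.1 ++ [st.2 + n], st.2 + n)) (p ++ [t], t)).1).map (fun x => PySem.Int.mod x pvMOD) := by
  induction numbers with
  | nil => intro p t; rfl
  | cons n ns ih =>
    intro p t
    have hlast : (PySem.List.pyGet? ((p ++ [t]).map (fun x => PySem.Int.mod x pvMOD)) (-1)).getD 0
        = PySem.Int.mod t pvMOD := by
      rw [List.map_append]
      simp [PySem.List.pyGet?_neg_one_append_singleton]
    have hstep : PySem.Int.mod
        (if PySem.Int.mod t pvMOD + n < 0 then PySem.Int.mod t pvMOD + n + pvMOD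
         else PySem.Int.mod t pvMOD + n) pvMOD = PySem.Int.mod (t + n) pvMOD := by
      have hm : (0:Int) < pvMOD := by norm_num [pvMOD]
      split_ifs with h
      · rw [PySem.Int.mod_eq_emod_of_pos hm]
        rw [Int.add_emod_right, ← PySem.Int.mod_eq_emod_of_pos hm, pv_mod_add_mod]
      · exact pv_mod_add_mod t n
    have hA : ((p ++ [t]).map (fun x => PySem.Int.mod x pvMOD)) ++ [PySem.Int.mod (t + n) pvMOD]
        = ((p ++ [t]) ++ [t + n]).map (fun x => PySem.Int.mod x pvMOD) := by
      simp
    simp only [List.foldl_cons, hlast, hstep, hA]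
    exact ih (p ++ [t]) (t + n)

-- ===== VERDICT (by name: the statement is the Claim_ definition above) =====
theorem get_cumulative_sum_sequential_mod_spec : Claim_equal_get_cumulative_sum_sequential_mod := by
  intro numbers _
  unfold Spec_get_cumulative_sum_sequential_mod
  unfold get_cumulative_sum_sequential_mod get_cumulative_sum_sequential_mod_alt
  have h := pv_fold_corr numbers [] 0
  simp only [List.nil_append, pv_rawfold] at h
  simp only [List.map_cons, List.map_nil, show PySem.Int.mod 0 pvMOD = (0:Int) from by decide,
    zero_add, List.map_id'] at h
  rw [pvRec_eq_raws]
  exact h
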